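-- pv_equiv track=rewrite | github.com/JohnSunny21/python-daily-coding | FreeCodeCamp/CodingQ/2026WinterGames/Day07SpeedSkating.py | largeset_difference
-- ===== SOURCE A (Python) =====
-- def largeset_difference(skater1, skater2):
--
--     max_diff = -1
--     lap_number = -1
--
--     for i in range(len(skater1)):
--         diff = abs(skater1[i] - skater2[i])
--         if diff > max_diff:
--             max_diff = diff
--             lap_number = i + 1
--
--     return lap_number
-- ===== SOURCE B (Python) =====
-- def largeset_difference(skater1, skater2):
--     diffs = [abs(skater1[i] - skater2[i]) for i in range(len(skater1))]
--     if not diffs: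
--         return -1
--     return diffs.index(max(diffs)) + 1
-- ===== Notes on version B (the rewrite author's own statement) =====
-- stated objective: alternative
-- what changed: Replaces the fused running-argmax loop (tracking max_diff and lap_number together) with a table of differences followed by separate max and first-index scans.
import Mathlib
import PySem

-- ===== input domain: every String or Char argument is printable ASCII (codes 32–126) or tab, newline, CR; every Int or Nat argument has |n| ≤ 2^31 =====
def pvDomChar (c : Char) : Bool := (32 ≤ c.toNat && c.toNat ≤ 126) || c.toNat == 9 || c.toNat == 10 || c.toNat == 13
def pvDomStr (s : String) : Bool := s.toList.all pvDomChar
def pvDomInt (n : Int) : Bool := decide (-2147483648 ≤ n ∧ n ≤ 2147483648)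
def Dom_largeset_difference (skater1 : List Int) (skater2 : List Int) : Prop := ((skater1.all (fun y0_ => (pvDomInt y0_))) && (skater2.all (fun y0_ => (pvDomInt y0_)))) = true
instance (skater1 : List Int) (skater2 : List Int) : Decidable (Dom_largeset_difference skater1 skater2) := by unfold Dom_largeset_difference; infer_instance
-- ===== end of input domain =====

-- B builds a table of absolute differences, then takes max and its first index, instead of A's fused running-argmax loop.


-- ===== PORT A =====
def largeset_difference (skater1 : List Int) (skater2 : List Int) : Int :=
  ((PySem.List.pyRange 0 skater1.length 1).foldl
    (fun st i =>
      let diff := |PySem.List.pyGetD skater1 i 0 - PySem.List.pyGetD skater2 i 0|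
      if diff > st.1 then (diff, i + 1) else st)
    (-1, -1)).2

-- ===== PORT B =====
def largeset_difference_alt (skater1 : List Int) (skater2 : List Int) : Int :=
  let diffs := (PySem.List.pyRange 0 skater1.length 1).map
    (fun i => |PySem.List.pyGetD skater1 i 0 - PySem.List.pyGetD skater2 i 0|)
  if diffs.isEmpty then -1
  else
    match PySem.List.max? diffs (fun x => x) with
    | none => -1                 -- unreachable: diffs is nonempty here
    | some m =>
      match PySem.List.index? diffs m with
      | some j => (j : Int) + 1
      | none => -1               -- unreachable: max is a member (Python .index would raise ValueError)

-- ===== PRECONDITION & SPEC =====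
-- A (and B) raise IndexError when skater2 is shorter than skater1; exactly those inputs are excluded.
def Pre_largeset_difference (skater1 : List Int) (skater2 : List Int) : Prop := skater1.length ≤ skater2.length
instance (skater1 : List Int) (skater2 : List Int) : Decidable (Pre_largeset_difference skater1 skater2) := by unfold Pre_largeset_difference; infer_instance
def pvWitness_largeset_difference : List Int × List Int := ([3, -2, 7], [1, 4, 2])
def Spec_largeset_difference (skater1 : List Int) (skater2 : List Int) (out : Int) : Prop := out = largeset_difference_alt skater1 skater2
instance (skater1 : List Int) (skater2 : List Int) (out : Int) : Decidable (Spec_largeset_difference skater1 skater2 out) := by unfold Spec_largeset_difference; infer_instance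

-- ===== CLAIM (what is proved, stated in full; the proofs are below) =====
def Claim_equal_largeset_difference : Prop := ∀ (skater1 : List Int) (skater2 : List Int), Dom_largeset_difference skater1 skater2 → Pre_largeset_difference skater1 skater2 → Spec_largeset_difference skater1 skater2 (largeset_difference skater1 skater2)

-- ===== LEMMAS AND PROOFS =====

-- A's loop step, viewed on (index, diff) pairs.
def pvStepA (st : Int × Int) (p : Int × Int) : Int × Int :=
  if p.2 > st.1 then (p.2, p.1 + 1) else st

theorem pv_le_foldl_max (d : List Int) (m : Int) : m ≤ d.foldl max m := by
  induction d generalizing m with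
  | nil => simp
  | cons x t ih => exact le_trans (le_max_left m x) (ih (max m x))

theorem pv_mem_le_foldl_max (d : List Int) (m : Int) : ∀ x ∈ d, x ≤ d.foldl max m := by
  induction d generalizing m with
  | nil => simp
  | cons y t ih =>
    intro x hx
    rcases List.mem_cons.mp hx with h | h
    · subst h; exact le_trans (le_max_right m x) (pv_le_foldl_max t (max m x))
    · exact ih (max m y) x h

theorem pv_foldl_max_eq_of_le (d : List Int) (m : Int) (h : ∀ x ∈ d, x ≤ m) :
    d.foldl max m = m := by
  induction d generalizing m with
  | nil => rfl
  | cons x t ih =>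
    have hx : x ≤ m := h x (List.mem_cons_self)
    simp only [List.foldl_cons, max_eq_left hx]
    exact ih m (fun y hy => h y (List.mem_cons_of_mem _ hy))

theorem pv_foldl_max_mem_or (d : List Int) (m : Int) :
    d.foldl max m = m ∨ d.foldl max m ∈ d := by
  induction d generalizing m with
  | nil => left; rfl
  | cons x t ih =>
    rcases ih (max m x) with h | h
    · simp only [List.foldl_cons] at *
      rcases max_cases m x with ⟨he, _⟩ | ⟨he, _⟩
      · left; rw [h, he]
      · right; rw [h, he]; exact List.mem_cons_self
    · right; exact List.mem_cons_of_mem _ h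

theorem pv_idxOf?_of_mem (l : List Int) (v : Int) (h : v ∈ l) :
    l.idxOf? v = some (l.idxOf v) := by
  induction l with
  | nil => simp at h
  | cons x t ih =>
    by_cases hxv : x = v
    · subst hxv; simp [List.idxOf?_cons, List.idxOf_cons, beq_self_eq_true]
    · have hvt : v ∈ t := by
        rcases List.mem_cons.mp h with h' | h'
        · exact absurd h'.symm hxv
        · exact h'
      have hne : (x == v) = false := beq_false_of_ne hxv
      simp [List.idxOf?_cons, List.idxOf_cons, hne, ih hvt]

-- The fused argmax loop on enumerated values, characterised.
theorem pv_argmax_fold (d : List Int) : ∀ (s m lap : Int),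
    (PySem.List.enumerate d s).foldl pvStepA (m, lap) =
      if ∀ x ∈ d, x ≤ m then (m, lap)
      else (d.foldl max m, s + (d.idxOf (d.foldl max m) : Int) + 1) := by
  induction d with
  | nil => intro s m lap; simp [PySem.List.enumerate_nil]
  | cons x t ih =>
    intro s m lap
    rw [PySem.List.enumerate_cons]
    simp only [List.foldl_cons]
    by_cases hx : x > m
    · have hstep : pvStepA (m, lap) (s, x) = (x, s + 1) := by
        simp [pvStepA, hx]
      rw [hstep, ih (s + 1) x (s + 1)]
      have hmx : max m x = x := max_eq_right (le_of_lt hx)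
      have hall : ¬ ∀ y ∈ x :: t, y ≤ m := by
        intro h; exact absurd (h x List.mem_cons_self) (not_le_of_gt hx)
      by_cases ht : ∀ y ∈ t, y ≤ x
      · have hMt : t.foldl max (max m x) = x := by
          rw [hmx]; exact pv_foldl_max_eq_of_le t x ht
        simp only [if_pos ht, List.foldl_cons, if_neg hall, hMt, List.idxOf_cons_self]
        simp
      · obtain ⟨y, hy, hyx⟩ : ∃ y ∈ t, x < y := by
          by_contra hc
          push_neg at hc
          exact ht hc
        have hxM : x ≠ t.foldl max x :=
          ne_of_lt (lt_of_lt_of_le hyx (pv_mem_le_foldl_max t x y hy))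
        simp only [if_neg ht, List.foldl_cons, if_neg hall, hmx, List.idxOf_cons_ne _ hxM]
        congr 1
        push_cast; ring
    · have hstep : pvStepA (m, lap) (s, x) = (m, lap) := by
        simp [pvStepA, hx]
      rw [hstep, ih (s + 1) m lap]
      have hmx : max m x = m := max_eq_left (le_of_not_gt hx)
      by_cases ht : ∀ y ∈ t, y ≤ m
      · have hall : ∀ y ∈ x :: t, y ≤ m := by
          intro y hy
          rcases List.mem_cons.mp hy with h | h
          · subst h; exact le_of_not_gt hx
          · exact ht y h
        simp only [if_pos ht, if_pos hall]
      · have hxM : x ≠ t.foldl max m := by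
          obtain ⟨y, hy, hym⟩ : ∃ y ∈ t, m < y := by
            by_contra hc
            push_neg at hc
            exact ht hc
          exact ne_of_lt (lt_of_le_of_lt (le_of_not_gt hx)
            (lt_of_lt_of_le hym (pv_mem_le_foldl_max t m y hy)))
        have hall : ¬ ∀ y ∈ x :: t, y ≤ m := by
          intro h; exact ht fun y hy => h y (List.mem_cons_of_mem _ hy)
        simp only [if_neg ht, if_neg hall, List.foldl_cons, hmx, List.idxOf_cons_ne _ hxM]
        congr 1
        push_cast; ring

-- ===== VERDICT (by name: the statement is the Claim_ definition above) =====
theorem largeset_difference_spec : Claim_equal_largeset_difference := by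
  intro s1 s2 _ _
  unfold Spec_largeset_difference largeset_difference largeset_difference_alt
  set f : Int → Int := fun i => |PySem.List.pyGetD s1 i 0 - PySem.List.pyGetD s2 i 0| with hf
  set diffs := (PySem.List.pyRange 0 s1.length 1).map f with hdiffs
  -- rewrite A's fold as a fold over the enumerated diffs
  have hA : (PySem.List.pyRange 0 (s1.length : Int) 1).foldl
      (fun st i => if f i > st.1 then (f i, i + 1) else st) (-1, -1)
      = (PySem.List.enumerate diffs 0).foldl pvStepA (-1, -1) := by
    rw [PySem.List.enumerate_eq_map_pyRange (d := 0), List.foldl_map]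
    have hlen : PySem.List.len diffs = (s1.length : Int) := by
      simp [hdiffs, PySem.List.length_pyRange_one]
    rw [hlen]
    apply PySem.List.foldl_congr_mem
    intro st i hi
    have hi' := (PySem.List.mem_pyRange_one).mp hi
    have hget : PySem.List.pyGetD diffs i 0 = f i := by
      rw [hdiffs]
      exact PySem.List.pyGetD_map_pyRange_of_nonneg f (s1.length : Int) i 0 hi'.1 hi'.2
    simp [pvStepA, hget]
  rw [hA]
  have hnn : ∀ y ∈ diffs, 0 ≤ y := by
    rw [hdiffs]
    intro y hy
    obtain ⟨i, _, rfl⟩ := List.mem_map.mp hy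
    exact abs_nonneg _
  rcases hd : diffs with _ | ⟨x, t⟩
  · simp [hd, PySem.List.enumerate_nil]
  · rw [hd] at hnn
    have hx0 : 0 ≤ x := hnn x List.mem_cons_self
    have hnotall : ¬ ∀ y ∈ x :: t, y ≤ (-1 : Int) := by
      intro h
      exact absurd (h x List.mem_cons_self) (by omega)
    dsimp only
    rw [pv_argmax_fold, if_neg hnotall]
    have hM : (x :: t).foldl max (-1) = t.foldl max x := by
      simp only [List.foldl_cons, max_eq_right (show (-1 : Int) ≤ x by omega)]
    have hMmem : t.foldl max x ∈ x :: t := by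
      rcases pv_foldl_max_mem_or t x with h | h
      · rw [h]; exact List.mem_cons_self
      · exact List.mem_cons_of_mem _ h
    simp only [hM, List.isEmpty_cons, if_neg (by simp : ¬ false = true),
      PySem.List.max?_id_cons, PySem.List.index?_eq_idxOf?,
      pv_idxOf?_of_mem _ _ hMmem]
    ring
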